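/- GENERATED by tools/from_farm_form.py from prooffarm-gif/accepted/DGifGetImageHeader.6/Lemmas.lean (a worked proof of the farm's unit `DGifGetImageHeader.6`,
   accepted by the verdict) — do not edit. -/
import Gif.Spec.Units.DGifGetImageHeader_6
import Gif.Spec.AllSegs

/-!
  Lemmas for the unit `DGifGetImageHeader.6` (108F4EH … 108F8BH, dgif_lib.c:418-423): a body segment of a protected function with a
  call in the middle. The segment is walked in TWO STEPS that meet at the return address 108F83H (`ret16`) of the call of
  DGifSetupDecompress, with a private assertion there.

      seg6_store_pv     a store into the scalar body of pv (`[pv + 4, pv + 64)`) keeps `HeapInv` ∧ `GifOK` ∧ `rem`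
      seg6_stores       the three stores of the first walk (a check's return address, `PixelCount`, the call's return address)
      seg6_AtRet16      the assertion at `ret16`: `Body` + the callee's result in `eax`
      seg6_call         108F4EH … the call … 108F83H: `Mid` → `seg6_AtRet16`
      seg6_tail         108F83H … 108E78H: `seg6_AtRet16` → `Done`
-/

open X86 X86.User Asan ProgX.Base ProgX.Base.Spec Gif.Spec

set_option maxRecDepth 4000
set_option maxHeartbeats 4000000

namespace Gif.Spec.DGifGetImageHeader_6

/-- **A store into the scalar body of pv** (`[pv + 4, pv + 64)`: FileHandle, the LZW scalars, CrntShiftDWord, PixelCount) keeps the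
heap's invariant, the state invariant and the reader's measure (the twin of `store_gif`, Gif/Spec/FrameCarry.lean §5). -/
theorem seg6_store_pv {H : Heap} {rest : List Obj} {frames : List (Nat × FrameLayout)} {F : Forest} {R : Rd} {top : Nat}
    {mem : Mem} (hinv : HeapInv H rest frames top mem) (hok : GifOK H F R mem)
    (hcur : 0x700000 ≤ R.cur ∧ R.cur + 16 ≤ 0x800000) (hbase : H.base = 0x800000) (a : Word) (k val : Nat)
    (hw : F.pv + 4 ≤ a.toNat ∧ a.toNat + k ≤ F.pv + 64) :
    HeapInv H rest frames top (mem.writeLE a k val) ∧ GifOK H F R (mem.writeLE a k val) ∧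
      rem R (mem.writeLE a k val) = rem R mem := by
  have hpin := hok.owns.inside hinv.heap (o := (F.pv, 24936)) (List.mem_cons_of_mem _ List.mem_cons_self)
  simp only at hpin
  have hp1 := hpin.1
  have hp2 := hpin.2.2.2.2
  clear hpin
  have hs : Mem.SameExcept [⟨a.toNat, a.toNat + k⟩] mem (mem.writeLE a k val) :=
    Mem.SameExcept.writeLE _ mem a k val (by omega) ⟨_, List.mem_cons_self, Nat.le_refl _, Nat.le_refl _⟩
  refine ⟨hinv.writeLE_live hok.pv_live a k val (by omega) (by omega), ?_, ?_⟩
  · apply hok.sameExcept hinv.heap hcur hs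
    intro w hw'
    have e := List.mem_singleton.mp hw'
    rw [e]
    apply Loose.pvBody
    left
    simp only
    omega
  · apply rem_sameExcept hs (by omega)
    intro w hw'
    have e := List.mem_singleton.mp hw'
    rw [e]
    simp only
    omega

/-- **The three stores between 108F4EH and the entry of DGifSetupDecompress** (the walker merges the three check calls' return
addresses, all pushed to `[rsp - 8]`, into one): a return address below the body's stack pointer `sp`, `Private->PixelCount`
(`pv + 56`), the call's return address. They keep the heap's invariant, the state invariant and the reader's measure. -/
theorem seg6_stores {H : Heap} {rest : List Obj} {frames : List (Nat × FrameLayout)} {F : Forest} {R : Rd} {top : Nat}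
    {mem : Mem} (hinv : HeapInv H rest frames top mem) (hok : GifOK H F R mem)
    (hcur : 0x700000 ≤ R.cur ∧ R.cur + 16 ≤ 0x800000) (hbase : H.base = 0x800000) (sp pw : Word) (x val y : Nat)
    (h1 : 0x700000 ≤ sp.toNat) (h2 : sp.toNat + 8 ≤ R.cur) (hpw : pw.toNat = F.pv + 56) :
    HeapInv H rest frames top (((mem.writeLE sp 8 x).writeLE pw 8 val).writeLE sp 8 y) ∧
      GifOK H F R (((mem.writeLE sp 8 x).writeLE pw 8 val).writeLE sp 8 y) ∧
      rem R (((mem.writeLE sp 8 x).writeLE pw 8 val).writeLE sp 8 y) = rem R mem := by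
  obtain ⟨hinvA, hokA, hremA⟩ := store_stack hinv hok hcur sp 8 x h1 h2
  obtain ⟨hinvB, hokB, hremB⟩ := seg6_store_pv hinvA hokA hcur hbase pw 8 val (by omega)
  obtain ⟨hinvC, hokC, hremC⟩ := store_stack hinvB hokB hcur sp 8 y h1 h2
  exact ⟨hinvC, hokC, hremC.trans (hremB.trans hremA)⟩

/-- **At 108F83H (ret16), `DGifSetupDecompress(gif)` has returned**: `Body` (the heap and the forest are still `Hc`, `Fc`), `eax` is
GIF_OK or GIF_ERROR, and GIF_OK means the LZW field ranges hold. -/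
structure seg6_AtRet16 (H : Heap) (rest : List Obj) (frames : List (Nat × FrameLayout)) (F : Forest) (R : Rd)
    (Hc : Heap) (Fc : Forest) (u₀ e : State) (ret : Word) (v : State) : Prop where
  body : DGifGetImageHeader.Body Gif.L.DGifGetImageHeader.ret16 H rest frames F R Hc Fc u₀ e ret v
  res : IsBool v
  lz : (v.reg .rax).toNat = 1 → LZOK v.mem F.pv

/-- **108F4EH … the call of DGifSetupDecompress … 108F83H (ret16)** (dgif_lib.c:418-423): the checked loads of `gif.Image.Width`
(`gif + 48`) and `.Height` (`gif + 52`), their sign-extended 64-bit product, the checked store of `Private->PixelCount`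
(`pv + 56`), `DGifSetupDecompress(gif)` with its contract for the present heap `Hc` and forest `Fc`. -/
theorem seg6_call (Lay : Layout) (hLay : Lay.hi = 0x1000000) (μ : Microarch) (hμ : UserX.MicroOK μ) (u₀ : State)
    (hcode : HasCodeNat Lay u₀ Gif.L.DGifGetImageHeader.entry Gif.Code.code_DGifGetImageHeader.nat Gif.L.DGifGetImageHeader.size)
    (H : Heap) (rest : List Obj) (frames : List (Nat × FrameLayout)) (F : Forest) (R : Rd) (e : State) (ret : Word)
    (Hc : Heap) (Fc : Forest)
    (h_setup : Calls Lay μ ProgX.Base.WayInv (ProgX.Base.conv u₀) Gif.L.DGifSetupDecompress.entry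
      (Gif.Spec.DGifSetupDecompress.spec Hc rest (DGifGetImageHeader.framesIn frames e) Fc R))
    (h_asan_load4_noabort : Asan.SmallCheck Lay μ ProgX.Base.WayInv (ProgX.Base.CodeOK u₀) [.rax, .rcx, .rdx] 4
      ProgX.Base.L.__asan_load4_noabort.entry)
    (h_asan_store8_noabort : Asan.SmallCheck Lay μ ProgX.Base.WayInv (ProgX.Base.CodeOK u₀) [.rax, .rcx, .rdx] 8
      ProgX.Base.L.__asan_store8_noabort.entry)
    (v : State) (hat : DGifGetImageHeader.Mid Gif.L.DGifGetImageHeader.at_108f4e H rest frames F R Hc Fc u₀ e ret v) :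
    ReachVia Lay μ ProgX.Base.WayInv v (seg6_AtRet16 H rest frames F R Hc Fc u₀ e ret) := by
  -- THE PRELUDE: the entry assertion `Mid` = `Body` + `r12 = pv`
  obtain ⟨hbody, hr12⟩ := hat
  have he := hbody.entry
  v_entry he
  obtain ⟨henv, hrdi⟩ := hbody.pre
  obtain ⟨fgif, fpv, fscm, fsaved, fpend⟩ := hbody.forest
  have w_rip := hbody.rip
  have c_rsp : v.reg .rsp = e.reg .rsp - 136 := hbody.rsp
  have c_rbx : v.reg .rbx = e.reg .rdi := hbody.rbx
  have w_kept : RegsKept [.rsp] v v := RegsKept.refl _ _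
  have w_eq : Mem.EqOn ProgX.Base.L.textLo ProgX.Base.L.textHi u₀.mem v.mem := ProgX.Base.conv_code_eqOn hbody.code
  have hdf := (show abiInv _ from hbody.abi).1
  have hmx := (show abiInv _ from hbody.abi).2
  have hsse := ProgX.Base.sseOK_of_abiInv hbody.abi
  have k_r15 : v.mem.readLE (e.reg .rsp - 8) 8 = (e.reg .r15).toNat := hbody.slot_r15
  have k_r14 : v.mem.readLE (e.reg .rsp - 16) 8 = (e.reg .r14).toNat := hbody.slot_r14
  have k_r13 : v.mem.readLE (e.reg .rsp - 24) 8 = (e.reg .r13).toNat := hbody.slot_r13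
  have k_r12 : v.mem.readLE (e.reg .rsp - 32) 8 = (e.reg .r12).toNat := hbody.slot_r12
  have k_rbp : v.mem.readLE (e.reg .rsp - 40) 8 = (e.reg .rbp).toNat := hbody.slot_rbp
  have k_rbx : v.mem.readLE (e.reg .rsp - 48) 8 = (e.reg .rbx).toNat := hbody.slot_rbx
  have k_ra : UInt64.ofNat (v.mem.readLE (e.reg .rsp) 8) = ret := hbody.slot_ra
  have hsame : Mem.SameExcept
    [⟨(e.reg .rsp).toNat - 448, (e.reg .rsp).toNat⟩,
     shadowSpan ((e.reg .rsp).toNat - 120) ((e.reg .rsp).toNat - 56),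
     ⟨0x800000, 0x1000020⟩,
     ⟨R.cur, R.cur + 8⟩] e.mem v.mem := hbody.same
  have hcur := henv.ctx.cursor_range henv.heap.inv.shadow
  have hbase : Hc.base = 0x800000 := hbody.region.1.trans henv.heap.base
  have hgin := hbody.ok.owns.inside hbody.inv.heap (o := (Fc.gif, 120)) List.mem_cons_self
  have hpin := hbody.ok.owns.inside hbody.inv.heap (o := (Fc.pv, 24936)) (List.mem_cons_of_mem _ List.mem_cons_self)
  simp only at hgin hpin
  rw [hbase, fgif] at hgin
  rw [hbase, fpv] at hpin
  have hg1 := hgin.1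
  have hg2 := hgin.2.2.2.2
  have hp1 := hpin.1
  have hp2 := hpin.2.2.2.2
  clear hgin hpin
  -- pv in r12 as a variable
  obtain ⟨pvw, c_r12⟩ : ∃ z, v.reg .r12 = z := ⟨_, rfl⟩
  rw [c_r12] at hr12
  -- gif and pv are live under the body's frames: what the three check goals ask
  have hgl : LiveIn (Hc.liveObjs ++ rest) (DGifGetImageHeader.framesIn frames e) Fc.gif 120 :=
    hbody.ok.gif_live.liveIn rest _ (Nat.le_refl _) (Nat.le_refl _)
  have hpl : LiveIn (Hc.liveObjs ++ rest) (DGifGetImageHeader.framesIn frames e) Fc.pv 24936 :=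
    hbody.ok.pv_live.liveIn rest _ (Nat.le_refl _) (Nat.le_refl _)
  rw [fgif] at hgl
  rw [fpv] at hpl
  -- the three stores of this walk keep the invariants, whatever the values
  have hst := fun (x val y : Nat) => seg6_stores hbody.inv hbody.ok ⟨hcur.1, hcur.2.1⟩ hbase (e.reg .rsp - 144) (pvw + 56) x val y
    (by u_omega) (by u_omega) (by rw [fpv]; u_omega)
  -- THE WALK, to the call's return address
  u_walk hcode [hμ.vendor] until [Gif.L.DGifGetImageHeader.ret16] span [ProgX.Base.L.textLo, ProgX.Base.L.textHi] side (v_side)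
  case check_108f52 =>
    -- dgif_lib.c:419 the load of `gif.Image.Width`: 4 bytes inside gif
    have hun : ShadowUntouched v.mem s_108f52.mem := by v_untouched
    exact hgl.accSmall hbody.inv.shadow hun _ 4 (by decide) (by u_omega) (by u_omega)
  case check_108f5f =>
    -- dgif_lib.c:420 the load of `gif.Image.Height`
    have hun : ShadowUntouched v.mem s_108f5f.mem := by v_untouched
    exact hgl.accSmall hbody.inv.shadow hun _ 4 (by decide) (by u_omega) (by u_omega)
  case check_108f71 =>
    -- dgif_lib.c:418 the store of `Private->PixelCount`: 8 bytes inside pv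
    have hun : ShadowUntouched v.mem s_108f71.mem := by v_untouched
    exact hpl.accSmall hbody.inv.shadow hun _ 8 (by decide) (by u_omega) (by u_omega)
  case call_inv =>
    v_inv
  case pre_108f7e =>
    -- DGIFSETUPDECOMPRESS'S PRECONDITION: `Env` for the present heap and forest, the own frame in front
    obtain ⟨hinvC, hokC, hremC⟩ := hst 1085302 _ 1085315
    rw [← w_mem] at hinvC hokC
    have e_top : (s_108f7e.reg .rsp).toNat + 8 = (e.reg .rsp).toNat - 136 := by
      rw [w_rsp]
      u_omega
    have hlimit : Hc.limit = 0xC00000 := hbody.region.2.trans henv.heap.limit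
    refine ⟨⟨⟨?_, hbase, hlimit, henv.heap.text, henv.heap.offText⟩, henv.ctx.push _ _, hokC⟩, ?_⟩
    · rw [e_top]
      exact hinvC
    · rw [w_rdi, fgif]
      exact hrdi
  -- 0x108f83 (ret16): DGIFSETUPDECOMPRESS HAS RETURNED
  obtain ⟨hback, hbool, hlz⟩ : Back Hc rest (DGifGetImageHeader.framesIn frames e) Fc R s_108f7e s_108f7er ∧ IsBool s_108f7er ∧
    ((s_108f7er.reg .rax).toNat = 1 → LZOK s_108f7er.mem Fc.pv ∧ rem R s_108f7er.mem + 1 = rem R s_108f7e.mem) := w_post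
  obtain ⟨hinvC, hokC, hremC⟩ := hst 1085302 _ 1085315
  rw [← w_mem_108f7e] at hremC
  clear hinvC hokC hst
  -- the product `Width * Height` as a variable
  obtain ⟨val, hvaldef⟩ : ∃ val : Nat, val = UInt64.toNat
      (Word.ofBV (BitVec.signExtend 64 (BitVec.ofNat 32 (v.mem.readLE (e.reg .rdi + 48) 4))) *
        Word.ofBV (BitVec.signExtend 64 (BitVec.ofNat 32 (v.mem.readLE (e.reg .rdi + 52) 4)))) := ⟨_, rfl⟩
  rw [← hvaldef] at w_mem_108f7e
  clear hvaldef w_r13 w_r13_108f7e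
  have e_top : (s_108f7e.reg .rsp).toNat + 8 = (e.reg .rsp).toNat - 136 := by
    rw [w_rsp_108f7e]
    u_omega
  -- the callee's footprint in terms of `v`
  v_after_call w_rsp_108f7e w_mem_108f7e
  rw [fpv, fgif] at w_same
  -- THE SLOTS AND THE RETURN ADDRESS, over the stores of the walk (first step) and through the callee's footprint (second step)
  have hp_r15 : s_108f7e.mem.readLE (e.reg .rsp - 8) 8 = (e.reg .r15).toNat := by
    rw [w_mem_108f7e]
    u_frame k_r15
  rw [w_mem_108f7e] at hp_r15
  have hs_r15 : s_108f7er.mem.readLE (e.reg .rsp - 8) 8 = (e.reg .r15).toNat := by u_frame hp_r15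
  have hp_r14 : s_108f7e.mem.readLE (e.reg .rsp - 16) 8 = (e.reg .r14).toNat := by
    rw [w_mem_108f7e]
    u_frame k_r14
  rw [w_mem_108f7e] at hp_r14
  have hs_r14 : s_108f7er.mem.readLE (e.reg .rsp - 16) 8 = (e.reg .r14).toNat := by u_frame hp_r14
  have hp_r13 : s_108f7e.mem.readLE (e.reg .rsp - 24) 8 = (e.reg .r13).toNat := by
    rw [w_mem_108f7e]
    u_frame k_r13
  rw [w_mem_108f7e] at hp_r13
  have hs_r13 : s_108f7er.mem.readLE (e.reg .rsp - 24) 8 = (e.reg .r13).toNat := by u_frame hp_r13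
  have hp_r12 : s_108f7e.mem.readLE (e.reg .rsp - 32) 8 = (e.reg .r12).toNat := by
    rw [w_mem_108f7e]
    u_frame k_r12
  rw [w_mem_108f7e] at hp_r12
  have hs_r12 : s_108f7er.mem.readLE (e.reg .rsp - 32) 8 = (e.reg .r12).toNat := by u_frame hp_r12
  have hp_rbp : s_108f7e.mem.readLE (e.reg .rsp - 40) 8 = (e.reg .rbp).toNat := by
    rw [w_mem_108f7e]
    u_frame k_rbp
  rw [w_mem_108f7e] at hp_rbp
  have hs_rbp : s_108f7er.mem.readLE (e.reg .rsp - 40) 8 = (e.reg .rbp).toNat := by u_frame hp_rbp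
  have hp_rbx : s_108f7e.mem.readLE (e.reg .rsp - 48) 8 = (e.reg .rbx).toNat := by
    rw [w_mem_108f7e]
    u_frame k_rbx
  rw [w_mem_108f7e] at hp_rbx
  have hs_rbx : s_108f7er.mem.readLE (e.reg .rsp - 48) 8 = (e.reg .rbx).toNat := by u_frame hp_rbx
  have hpra : UInt64.ofNat (s_108f7e.mem.readLE (e.reg .rsp) 8) = ret := by
    rw [w_mem_108f7e]
    u_frame k_ra
  rw [w_mem_108f7e] at hpra
  have hsra : UInt64.ofNat (s_108f7er.mem.readLE (e.reg .rsp) 8) = ret := by u_frame hpra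
  -- the footprint since the entry: the callee's windows lie inside the function's
  have hsame1 : Mem.SameExcept
    [⟨(e.reg .rsp).toNat - 448, (e.reg .rsp).toNat⟩,
     shadowSpan ((e.reg .rsp).toNat - 120) ((e.reg .rsp).toNat - 56),
     ⟨0x800000, 0x1000020⟩,
     ⟨R.cur, R.cur + 8⟩] e.mem s_108f7er.mem := by u_same
  -- the heap's invariant comes back with the clean stack at the callee's `rsp + 8` = the body's `rsp`
  have hinv1 : HeapInv Hc rest (DGifGetImageHeader.framesIn frames e) ((e.reg .rsp).toNat - 136) s_108f7er.mem := by
    rw [← e_top]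
    exact hback.inv
  -- THE EXIT ASSERTION: `Body` at `ret16` …
  have hbody1 : DGifGetImageHeader.Body Gif.L.DGifGetImageHeader.ret16 H rest frames F R Hc Fc u₀ e ret s_108f7er := {
    entry := hbody.entry
    pre := hbody.pre
    rip := w_rip
    rsp := w_rsp
    rbx := (w_kept.get .rbx rfl).trans hbody.rbx
    rbp := (w_kept.get .rbp rfl).trans hbody.rbp
    slot_r15 := hs_r15
    slot_r14 := hs_r14
    slot_r13 := hs_r13
    slot_r12 := hs_r12
    slot_rbp := hs_rbp
    slot_rbx := hs_rbx
    slot_ra := hsra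
    inv := hinv1
    region := hbody.region
    forest := hbody.forest
    ok := hback.ok
    rem := by
      have h1 := hback.rem
      have h2 := hbody.rem
      omega
    same := hsame1
    code := w_code
    abi := w_inv
  }
  -- … and the callee's result
  refine ReachVia.done ?_
  exact {
    body := hbody1
    res := hbool
    lz := by
      intro h1
      rw [← fpv]
      exact (hlz h1).1
  }

/-- **108F83H (ret16) … 108E78H** (dgif_lib.c:423): `mov r13d, eax` (the result of DGifSetupDecompress, zero-extended) and the
jump to the epilogue. No memory is written. -/
theorem seg6_tail (Lay : Layout) (hLay : Lay.hi = 0x1000000) (μ : Microarch) (hμ : UserX.MicroOK μ) (u₀ : State)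
    (hcode : HasCodeNat Lay u₀ Gif.L.DGifGetImageHeader.entry Gif.Code.code_DGifGetImageHeader.nat Gif.L.DGifGetImageHeader.size)
    (H : Heap) (rest : List Obj) (frames : List (Nat × FrameLayout)) (F : Forest) (R : Rd) (e : State) (ret : Word)
    (Hc : Heap) (Fc : Forest)
    (v : State) (hat : seg6_AtRet16 H rest frames F R Hc Fc u₀ e ret v) :
    ReachVia Lay μ ProgX.Base.WayInv v (DGifGetImageHeader.Done H rest frames F R Hc Fc u₀ e ret) := by
  -- THE PRELUDE: the private assertion at `ret16`
  obtain ⟨hbody, hbool, hlz⟩ := hat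
  have he := hbody.entry
  v_entry he
  have w_rip := hbody.rip
  have c_rsp : v.reg .rsp = e.reg .rsp - 136 := hbody.rsp
  -- `rax` as a variable `z`
  obtain ⟨z, c_rax⟩ : ∃ z, v.reg .rax = z := ⟨_, rfl⟩
  unfold IsBool at hbool
  rw [c_rax] at hbool hlz
  have w_kept : RegsKept [.rsp] v v := RegsKept.refl _ _
  have w_eq : Mem.EqOn ProgX.Base.L.textLo ProgX.Base.L.textHi u₀.mem v.mem := ProgX.Base.conv_code_eqOn hbody.code
  have hdf := (show abiInv _ from hbody.abi).1
  have hmx := (show abiInv _ from hbody.abi).2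
  have hsse := ProgX.Base.sseOK_of_abiInv hbody.abi
  -- THE WALK: two instructions
  u_walk hcode [hμ.vendor] until [Gif.L.DGifGetImageHeader.at_108e78] span [ProgX.Base.L.textLo, ProgX.Base.L.textHi] side (v_side)
  -- 0x108e78: the result register, as a number
  have hr13 : (s_108f86.reg .r13).toNat = z.toNat % 2 ^ 32 := by
    rw [w_r13, ProgX.toNat_ofBV32, ProgX.toNat_part32]
  -- THE EXIT ASSERTION: `Body` at 0x108e78 (nothing was written) …
  have hbody1 : DGifGetImageHeader.Body Gif.L.DGifGetImageHeader.at_108e78 H rest frames F R Hc Fc u₀ e ret s_108f86 := {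
    entry := hbody.entry
    pre := hbody.pre
    rip := w_rip
    rsp := w_rsp
    rbx := (w_kept.get .rbx rfl).trans hbody.rbx
    rbp := (w_kept.get .rbp rfl).trans hbody.rbp
    slot_r15 := by
      rw [w_mem]
      exact hbody.slot_r15
    slot_r14 := by
      rw [w_mem]
      exact hbody.slot_r14
    slot_r13 := by
      rw [w_mem]
      exact hbody.slot_r13
    slot_r12 := by
      rw [w_mem]
      exact hbody.slot_r12
    slot_rbp := by
      rw [w_mem]
      exact hbody.slot_rbp
    slot_rbx := by
      rw [w_mem]
      exact hbody.slot_rbx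
    slot_ra := by
      rw [w_mem]
      exact hbody.slot_ra
    inv := by
      rw [w_mem]
      exact hbody.inv
    region := hbody.region
    forest := hbody.forest
    ok := by
      rw [w_mem]
      exact hbody.ok
    rem := by
      rw [w_mem]
      exact hbody.rem
    same := by
      rw [w_mem]
      exact hbody.same
    code := ProgX.Base.conv_code_in w_eq
    abi := by
      refine ProgX.Base.abiInv_of ?_ ?_
      · rw [w_flags]
        exact hdf
      · rw [w_mxcsr]
        exact hmx
  }
  -- … and the result: GIF_OK or GIF_ERROR in `r13d`; GIF_OK with the LZW field ranges
  refine ReachVia.done ?_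
  exact {
    body := hbody1
    res := by
      rw [hr13]
      omega
    lz := by
      intro h1
      rw [hr13] at h1
      rw [w_mem]
      apply hlz
      omega
  }

end Gif.Spec.DGifGetImageHeader_6
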